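-- pv_equiv track=rewrite | github.com/rookinc/xalchemy_lab | src/xalchemy_lab/paper/tri_patch/run_tri_patch_holonomy_snf_probe.py | minors_gcd
-- ===== SOURCE A (Python) =====
-- from math import gcd
-- from itertools import combinations
--
-- def det_bareiss(mat: list[list[int]]) -> int:
--     n = len(mat)
--     if n == 0:
--         return 1
--     a = [row[:] for row in mat]
--     sign = 1
--     prev = 1
--     for k in range(n - 1):
--         pivot = a[k][k]
--         if pivot == 0:
--             swap_row = None
--             for i in range(k + 1, n):
--                 if a[i][k] != 0:
--                     swap_row = i
--                     break
--             if swap_row is None: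
--                 return 0
--             a[k], a[swap_row] = a[swap_row], a[k]
--             sign *= -1
--             pivot = a[k][k]
--         for i in range(k + 1, n):
--             for j in range(k + 1, n):
--                 a[i][j] = (a[i][j] * pivot - a[i][k] * a[k][j]) // prev
--         prev = pivot
--         for i in range(k + 1, n):
--             a[i][k] = 0
--         for j in range(k + 1, n):
--             a[k][j] = 0
--     return sign * a[n - 1][n - 1]
--
-- def gcd_list(values: list[int]) -> int:
--     g = 0
--     for v in values:
--         g = gcd(g, abs(v))
--     return g
--
-- def minors_gcd(matrix: list[list[int]], k: int) -> int:
--     rows = len(matrix)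
--     cols = len(matrix[0]) if matrix else 0
--     vals: list[int] = []
--     for row_idx in combinations(range(rows), k):
--         for col_idx in combinations(range(cols), k):
--             sub = [[matrix[r][c] for c in col_idx] for r in row_idx]
--             vals.append(det_bareiss(sub))
--     return gcd_list(vals)
-- ===== SOURCE B (Python) =====
-- from math import gcd
--
-- def _condense(m, prev):
--     # one fraction-free condensation step: pivot is m[0][0]
--     p = m[0][0]
--     return [[(row[j] * p - row[0] * m[0][j]) // prev for j in range(1, len(row))]
--             for row in m[1:]]
--
-- def _det_ff(m, prev, sign):
--     # recursive fraction-free determinant of a nonempty square matrix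
--     if len(m) == 1:
--         return sign * m[0][0]
--     if m[0][0] == 0:
--         i = next((i for i, row in enumerate(m) if row[0] != 0), None)
--         if i is None:
--             return 0
--         m = m[:]
--         m[0], m[i] = m[i], m[0]
--         sign = -sign
--     return _det_ff(_condense(m, prev), m[0][0], sign)
--
-- def _det(m):
--     return 1 if not m else _det_ff(m, 1, 1)
--
-- def _subsets(start, n, k):
--     # k-subsets of range(start, n), lexicographic order (recursion depth <= k)
--     if k == 0:
--         yield []
--     elif k > 0:
--         for first in range(start, n - k + 1):
--             for rest in _subsets(first + 1, n, k - 1):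
--                 yield [first] + rest
--
-- def minors_gcd(matrix, k):
--     rows = len(matrix)
--     cols = len(matrix[0]) if matrix else 0
--     g = 0
--     for ri in _subsets(0, rows, k):
--         for ci in _subsets(0, cols, k):
--             g = gcd(g, abs(_det([[matrix[r][c] for c in ci] for r in ri])))
--             if g == 1:
--                 return 1
--     return g
-- ===== Notes on version B (the rewrite author's own statement) =====
-- stated objective: alternative
-- what changed: B replaces A's in-place Bareiss elimination (mutating an n x n array with row swaps and explicit zeroing) by a recursive fraction-free condensation on shrinking submatrices, replaces itertools.combinations plus an intermediate list of all minors by a recursive subset generator, and folds the gcd on the fly with an early exit as soon as the gcd reaches 1.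
import Mathlib
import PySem

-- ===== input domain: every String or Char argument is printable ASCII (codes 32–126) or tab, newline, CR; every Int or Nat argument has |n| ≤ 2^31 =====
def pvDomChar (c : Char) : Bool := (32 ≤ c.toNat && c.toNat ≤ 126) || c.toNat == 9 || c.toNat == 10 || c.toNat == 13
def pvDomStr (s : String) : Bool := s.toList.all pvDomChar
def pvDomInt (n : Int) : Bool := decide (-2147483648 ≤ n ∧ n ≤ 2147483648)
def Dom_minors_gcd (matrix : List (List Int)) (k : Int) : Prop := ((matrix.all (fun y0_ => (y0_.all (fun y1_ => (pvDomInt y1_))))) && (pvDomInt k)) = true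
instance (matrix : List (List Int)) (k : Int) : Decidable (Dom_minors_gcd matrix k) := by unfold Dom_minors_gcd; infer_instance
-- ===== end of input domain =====

-- B rewrites A's in-place Bareiss elimination as a recursive fraction-free condensation and
-- streams the gcd over recursively generated index subsets with an early exit at gcd 1
-- (no intermediate list of minors); return-value equivalence is proved on Pre_ below.

-- ===== PORT A =====
-- det_bareiss: `for i in range(k+1, n): if a[i][k] != 0: swap_row = i; break`
def abSfind (a : List (List Int)) (k : Nat) : Nat → Nat → Option Nat
  | 0, _ => none
  | f+1, i => if ((a.getD i []).getD k 0) ≠ 0 then some i else abSfind a k f (i+1)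

-- inner `for j in range(k+1, n): a[i][j] = (a[i][j]*pivot - a[i][k]*a[k][j]) // prev`
def abJloop (k : Nat) (rowk : List Int) (pivot prev : Int) : Nat → Nat → List Int → List Int
  | 0, _, row => row
  | f+1, j, row =>
      abJloop k rowk pivot prev f (j+1)
        (row.set j (PySem.Int.floordiv (row.getD j 0 * pivot - row.getD k 0 * rowk.getD j 0) prev))

-- outer `for i in range(k+1, n): …`
def abIloop (k n : Nat) (pivot prev : Int) : Nat → Nat → List (List Int) → List (List Int)
  | 0, _, a => a
  | f+1, i, a =>
      abIloop k n pivot prev f (i+1)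
        (a.set i (abJloop k (a.getD k []) pivot prev (n - (k+1)) (k+1) (a.getD i [])))

-- `for i in range(k+1, n): a[i][k] = 0`
def abZcol (k : Nat) : Nat → Nat → List (List Int) → List (List Int)
  | 0, _, a => a
  | f+1, i, a => abZcol k f (i+1) (a.set i ((a.getD i []).set k 0))

-- `for j in range(k+1, n): a[k][j] = 0`
def abZrow (k : Nat) : Nat → Nat → List (List Int) → List (List Int)
  | 0, _, a => a
  | f+1, j, a => abZrow k f (j+1) (a.set k ((a.getD k []).set j 0))

-- the loop `for k in range(n-1)` of det_bareiss, with its early `return 0`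
def abBloop (n : Nat) : Nat → Nat → List (List Int) → Int → Int → Int
  | 0, _, a, sign, _ => sign * ((a.getD (n-1) []).getD (n-1) 0)
  | f+1, k, a, sign, prev =>
    let pivot := (a.getD k []).getD k 0
    let st : Option (List (List Int) × Int × Int) :=
      if pivot = 0 then
        match abSfind a k (n - (k+1)) (k+1) with
        | none => none
        | some s =>
          let a' := (a.set k (a.getD s [])).set s (a.getD k [])
          some (a', -sign, (a'.getD k []).getD k 0)
      else some (a, sign, pivot)
    match st with
    | none => 0
    | some (a1, sign1, piv) =>
      let a2 := abIloop k n piv prev (n - (k+1)) (k+1) a1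
      let a3 := abZcol k (n - (k+1)) (k+1) a2
      let a4 := abZrow k (n - (k+1)) (k+1) a3
      abBloop n f (k+1) a4 sign1 piv

def det_bareiss (mat : List (List Int)) : Int :=
  let n := mat.length
  if n = 0 then 1
  else abBloop n (n - 1) 0 (mat.map (fun row => row)) 1 1

def gcd_list (values : List Int) : Int :=
  values.foldl (fun g v => (Int.gcd g |v| : Int)) 0

-- itertools.combinations(xs, k), lexicographic order
def abCombos : Nat → List Nat → List (List Nat)
  | 0, _ => [[]]
  | _+1, [] => []
  | j+1, x :: xs => ((abCombos j xs).map (fun c => x :: c)) ++ abCombos (j+1) xs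

def minors_gcd (matrix : List (List Int)) (k : Int) : Int :=
  let rows := matrix.length
  let cols := (matrix.headD []).length   -- len(matrix[0]) if matrix else 0
  let vals := (abCombos k.toNat (List.range rows)).flatMap (fun ri =>
      (abCombos k.toNat (List.range cols)).map (fun ci =>
        det_bareiss (ri.map (fun r => ci.map (fun c => (matrix.getD r []).getD c 0)))))
  gcd_list vals

-- ===== PORT B =====
def bbCondense (m : List (List Int)) (prev : Int) : List (List Int) :=
  let h := m.headD []
  let p := h.headD 0
  (m.drop 1).map (fun row =>
    (List.range' 1 (row.length - 1)).map (fun j =>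
      PySem.Int.floordiv (row.getD j 0 * p - row.getD 0 0 * h.getD j 0) prev))

def bbDetff : Nat → List (List Int) → Int → Int → Int
  | 0, _, _, _ => 0
  | 1, m, _, sign => sign * ((m.headD []).headD 0)
  | f+2, m, prev, sign =>
    if (m.headD []).headD 0 = 0 then
      match m.findIdx? (fun row => row.headD 0 != 0) with
      | none => 0
      | some i =>
        let m' := (m.set 0 (m.getD i [])).set i (m.getD 0 [])
        bbDetff (f+1) (bbCondense m' prev) ((m'.headD []).headD 0) (-sign)
    else bbDetff (f+1) (bbCondense m prev) ((m.headD []).headD 0) sign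

def bbDet (m : List (List Int)) : Int :=
  if m.isEmpty then 1 else bbDetff m.length m 1 1

-- recursion of _subsets, with the structurally decreasing count k made explicit as fuel
def bbSubsetsA (n : Nat) : Nat → Nat → Int → List (List Nat)
  | 0, _, k => if k = 0 then [[]] else []
  | f+1, start, k =>
    if k = 0 then [[]]
    else if 0 < k then
      (List.range' start (n + 1 - k.toNat - start)).flatMap
        (fun first => (bbSubsetsA n f (first+1) (k-1)).map (fun c => first :: c))
    else []

def bbSubsets (start n : Nat) (k : Int) : List (List Nat) := bbSubsetsA n k.toNat start k

def bbGoCols (matrix : List (List Int)) (ri : List Nat) : List (List Nat) → Int → Int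
  | [], g => g
  | ci :: rest, g =>
    let g' := (Int.gcd g |bbDet (ri.map (fun r => ci.map (fun c => (matrix.getD r []).getD c 0)))| : Int)
    if g' = 1 then 1 else bbGoCols matrix ri rest g'

def bbGoRows (matrix : List (List Int)) (cis : List (List Nat)) : List (List Nat) → Int → Int
  | [], g => g
  | ri :: rest, g =>
    let g' := bbGoCols matrix ri cis g
    if g' = 1 then 1 else bbGoRows matrix cis rest g'

def minors_gcd_alt (matrix : List (List Int)) (k : Int) : Int :=
  let rows := matrix.length
  let cols := (matrix.headD []).length
  bbGoRows matrix (bbSubsets 0 cols k) (bbSubsets 0 rows k) 0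

-- ===== PRECONDITION & SPEC =====
-- Pre_ excludes exactly the inputs where the Python A raises: k < 0 (ValueError from
-- itertools.combinations) and ragged matrices whose later rows are shorter than row 0
-- while 1 ≤ k ≤ min(rows, cols) (IndexError on matrix[r][c]).
def Pre_minors_gcd (matrix : List (List Int)) (k : Int) : Prop :=
  0 ≤ k ∧ (k = 0 ∨ (matrix.length : Int) < k ∨ ((matrix.headD []).length : Int) < k ∨
    ∀ row ∈ matrix, (matrix.headD []).length ≤ row.length)
instance (matrix : List (List Int)) (k : Int) : Decidable (Pre_minors_gcd matrix k) := by
  unfold Pre_minors_gcd; infer_instance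

def pvWitness_minors_gcd : List (List Int) × Int := ([[2, 4], [6, 8]], 1)

def Spec_minors_gcd (matrix : List (List Int)) (k : Int) (out : Int) : Prop := out = minors_gcd_alt matrix k
instance (matrix : List (List Int)) (k : Int) (out : Int) : Decidable (Spec_minors_gcd matrix k out) := by unfold Spec_minors_gcd; infer_instance

-- ===== CLAIM (what is proved, stated in full; the proofs are below) =====
def Claim_equal_minors_gcd : Prop := ∀ (matrix : List (List Int)) (k : Int), Dom_minors_gcd matrix k → Pre_minors_gcd matrix k → Spec_minors_gcd matrix k (minors_gcd matrix k)

-- ===== LEMMAS AND PROOFS =====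

theorem pvListExt {α : Type} (l1 l2 : List α) (d : α) (h : l1.length = l2.length)
    (he : ∀ i, i < l1.length → l1.getD i d = l2.getD i d) : l1 = l2 := by
  apply List.ext_getElem h
  intro i h1 h2
  have := he i h1
  rwa [List.getD_eq_getElem _ _ h1, List.getD_eq_getElem _ _ h2] at this

theorem pvGetDMap {α β : Type} (l : List α) (f : α → β) (i : Nat) (d : α) (d' : β)
    (hf : f d = d') : (l.map f).getD i d' = f (l.getD i d) := by
  simp only [List.getD_eq_getElem?_getD, List.getElem?_map]
  cases h : l[i]? <;> simp [hf]

-- proof-side view: the trailing submatrix from row/column k on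
def pvTrail (k : Nat) (a : List (List Int)) : List (List Int) :=
  (a.drop k).map (fun r => r.drop k)

theorem pvGetDSet {α : Type} (l : List α) (i j : Nat) (v d : α) :
    (l.set i v).getD j d = if i = j ∧ i < l.length then v else l.getD j d := by
  simp [List.getD_eq_getElem?_getD, List.getElem?_set]
  split_ifs with h1 h2 h3 <;> simp_all <;> omega

theorem pvHeadDGetD {α : Type} (l : List α) (d : α) : l.headD d = l.getD 0 d := by
  cases l <;> rfl

theorem pvDropGetD (r : List Int) (k j : Nat) : (r.drop k).getD j 0 = r.getD (k+j) 0 := by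
  simp [List.getD_eq_getElem?_getD, List.getElem?_drop]

theorem pvTrailGetD (k : Nat) (a : List (List Int)) (i : Nat) :
    (pvTrail k a).getD i [] = (a.getD (k+i) []).drop k := by
  simp [pvTrail, List.getD_eq_getElem?_getD, List.getElem?_drop]
  cases h : a[k+i]? <;> simp

theorem pvTrailLen (k : Nat) (a : List (List Int)) : (pvTrail k a).length = a.length - k := by
  simp [pvTrail]

theorem abJloopLen (k : Nat) (rowk : List Int) (p prev : Int) :
    ∀ (f j0 : Nat) (row : List Int), (abJloop k rowk p prev f j0 row).length = row.length := by
  intro f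
  induction f with
  | zero => intro j0 row; rfl
  | succ f ih => intro j0 row; simp [abJloop, ih]

theorem abJloopGetD (k : Nat) (rowk : List Int) (p prev : Int) :
    ∀ (f j0 : Nat) (row : List Int), k < j0 → ∀ j,
      (abJloop k rowk p prev f j0 row).getD j 0 =
        if j0 ≤ j ∧ j < j0 + f ∧ j < row.length then
          PySem.Int.floordiv (row.getD j 0 * p - row.getD k 0 * rowk.getD j 0) prev
        else row.getD j 0 := by
  intro f
  induction f with
  | zero =>
    intro j0 row hk j
    rw [abJloop, if_neg (by omega)]
  | succ f ih =>
    intro j0 row hk j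
    rw [abJloop, ih (j0+1) _ (by omega) j]
    simp only [List.length_set, pvGetDSet]
    simp only [if_neg (fun h => absurd h.1 (by omega : ¬ j0 = k) : ¬(j0 = k ∧ j0 < row.length))]
    by_cases hj : j0 = j
    · subst hj
      by_cases hl : j0 < row.length
      · rw [if_neg (by omega), if_pos ⟨rfl, hl⟩, if_pos ⟨le_refl _, by omega, hl⟩]
      · rw [if_neg (by omega), if_neg (fun h => absurd h.2 hl), if_neg (fun h => absurd h.2.2 hl)]
    · rw [if_neg (fun h => absurd h.1 hj : ¬(j0 = j ∧ j0 < row.length))]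
      have hiff : (j0+1 ≤ j ∧ j < j0+1+f ∧ j < row.length) ↔ (j0 ≤ j ∧ j < j0+(f+1) ∧ j < row.length) := by
        omega
      simp only [hiff]

theorem abIloopLen (k n : Nat) (p prev : Int) :
    ∀ (f i0 : Nat) (a : List (List Int)), (abIloop k n p prev f i0 a).length = a.length := by
  intro f
  induction f with
  | zero => intro i0 a; rfl
  | succ f ih => intro i0 a; simp [abIloop, ih]

theorem abIloopGetD (k n : Nat) (p prev : Int) :
    ∀ (f i0 : Nat) (a : List (List Int)), k < i0 → ∀ i,
      (abIloop k n p prev f i0 a).getD i [] =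
        if i0 ≤ i ∧ i < i0 + f ∧ i < a.length then
          abJloop k (a.getD k []) p prev (n - (k+1)) (k+1) (a.getD i [])
        else a.getD i [] := by
  intro f
  induction f with
  | zero =>
    intro i0 a hk i
    rw [abIloop, if_neg (by omega)]
  | succ f ih =>
    intro i0 a hk i
    rw [abIloop, ih (i0+1) _ (by omega) i]
    simp only [List.length_set, pvGetDSet]
    simp only [if_neg (fun h => absurd h.1 (by omega : ¬ i0 = k) : ¬(i0 = k ∧ i0 < a.length))]
    by_cases hj : i0 = i
    · subst hj
      by_cases hl : i0 < a.length
      · rw [if_neg (by omega), if_pos ⟨rfl, hl⟩, if_pos ⟨le_refl _, by omega, hl⟩]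
      · rw [if_neg (by omega), if_neg (fun h => absurd h.2 hl), if_neg (fun h => absurd h.2.2 hl)]
    · rw [if_neg (fun h => absurd h.1 hj : ¬(i0 = i ∧ i0 < a.length))]
      have hiff : (i0+1 ≤ i ∧ i < i0+1+f ∧ i < a.length) ↔ (i0 ≤ i ∧ i < i0+(f+1) ∧ i < a.length) := by
        omega
      simp only [hiff]

theorem abZcolLen (k : Nat) :
    ∀ (f i0 : Nat) (a : List (List Int)), (abZcol k f i0 a).length = a.length := by
  intro f
  induction f with
  | zero => intro i0 a; rfl
  | succ f ih => intro i0 a; simp [abZcol, ih]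

theorem abZcolGetD (k : Nat) :
    ∀ (f i0 : Nat) (a : List (List Int)) (i : Nat),
      (abZcol k f i0 a).getD i [] =
        if i0 ≤ i ∧ i < i0 + f ∧ i < a.length then (a.getD i []).set k 0
        else a.getD i [] := by
  intro f
  induction f with
  | zero =>
    intro i0 a i
    rw [abZcol, if_neg (by omega)]
  | succ f ih =>
    intro i0 a i
    rw [abZcol, ih (i0+1) _ i]
    simp only [List.length_set, pvGetDSet]
    by_cases hj : i0 = i
    · subst hj
      by_cases hl : i0 < a.length
      · rw [if_neg (by omega), if_pos ⟨rfl, hl⟩, if_pos ⟨le_refl _, by omega, hl⟩]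
      · rw [if_neg (by omega), if_neg (fun h => absurd h.2 hl), if_neg (fun h => absurd h.2.2 hl)]
    · rw [if_neg (fun h => absurd h.1 hj : ¬(i0 = i ∧ i0 < a.length))]
      have hiff : (i0+1 ≤ i ∧ i < i0+1+f ∧ i < a.length) ↔ (i0 ≤ i ∧ i < i0+(f+1) ∧ i < a.length) := by
        omega
      simp only [hiff]

theorem abZrowLen (k : Nat) :
    ∀ (f j0 : Nat) (a : List (List Int)), (abZrow k f j0 a).length = a.length := by
  intro f
  induction f with
  | zero => intro j0 a; rfl
  | succ f ih => intro j0 a; simp [abZrow, ih]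

theorem abZrowGetDNe (k : Nat) :
    ∀ (f j0 : Nat) (a : List (List Int)) (i : Nat), i ≠ k →
      (abZrow k f j0 a).getD i [] = a.getD i [] := by
  intro f
  induction f with
  | zero => intro j0 a i hi; rfl
  | succ f ih =>
    intro j0 a i hi
    rw [abZrow, ih _ _ _ hi, pvGetDSet]
    rw [if_neg (by intro h; exact hi h.1.symm)]

theorem abZrowRowLen (k : Nat) :
    ∀ (f j0 : Nat) (a : List (List Int)),
      ((abZrow k f j0 a).getD k []).length = ((a.getD k []).length) := by
  intro f
  induction f with
  | zero => intro j0 a; rfl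
  | succ f ih =>
    intro j0 a
    rw [abZrow, ih, pvGetDSet]
    split_ifs <;> simp

theorem abSfindEq (a : List (List Int)) (k : Nat) :
    ∀ (f i0 : Nat), i0 + f = a.length →
      abSfind a k f i0 =
        ((a.drop i0).findIdx? (fun row => row.getD k 0 != 0)).map (fun t => i0 + t) := by
  intro f
  induction f with
  | zero =>
    intro i0 h
    rw [abSfind, List.drop_of_length_le (by omega)]
    rfl
  | succ f ih =>
    intro i0 h
    have hlt : i0 < a.length := by omega
    rw [abSfind, List.drop_eq_getElem_cons hlt, List.findIdx?_cons]
    by_cases hp : (a.getD i0 []).getD k 0 ≠ 0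
    · rw [if_pos hp]
      rw [List.getD_eq_getElem _ _ hlt] at hp
      rw [if_pos (by simpa [bne_iff_ne] using hp)]
      simp
    · rw [if_neg hp]
      rw [List.getD_eq_getElem _ _ hlt] at hp
      rw [if_neg (by simpa [bne_iff_ne] using hp)]
      rw [ih (i0+1) (by omega)]
      cases h' : (a.drop (i0+1)).findIdx? (fun row => row.getD k 0 != 0) <;> simp <;> omega

theorem pvTrailFindIdx (k : Nat) (a : List (List Int)) :
    (pvTrail k a).findIdx? (fun row => row.headD 0 != 0) =
      (a.drop k).findIdx? (fun row => row.getD k 0 != 0) := by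
  rw [pvTrail, List.findIdx?_map]
  congr 1
  funext r
  simp [Function.comp]

theorem pvDropGetDG {α : Type} (r : List α) (k j : Nat) (d : α) :
    (r.drop k).getD j d = r.getD (k+j) d := by
  simp [List.getD_eq_getElem?_getD, List.getElem?_drop]

theorem bbCondenseLen (m : List (List Int)) (prev : Int) :
    (bbCondense m prev).length = m.length - 1 := by
  simp [bbCondense]

theorem bbCondenseRowLen (m : List (List Int)) (prev : Int) (i' : Nat) :
    ((bbCondense m prev).getD i' []).length = (m.getD (1+i') []).length - 1 := by
  simp only [bbCondense]
  rw [pvGetDMap _ _ _ [] [] rfl, pvDropGetDG]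
  simp

theorem bbCondenseEntry (m : List (List Int)) (prev : Int) (i' j' : Nat)
    (hj : j' < (m.getD (1+i') []).length - 1) :
    ((bbCondense m prev).getD i' []).getD j' 0 =
      PySem.Int.floordiv ((m.getD (1+i') []).getD (1+j') 0 * ((m.headD []).headD 0)
        - (m.getD (1+i') []).getD 0 0 * (m.headD []).getD (1+j') 0) prev := by
  simp only [bbCondense]
  rw [pvGetDMap _ _ _ [] [] rfl, pvDropGetDG]
  have hlen : j' < ((List.range' 1 ((m.getD (1+i') []).length - 1)).map (fun j =>
      PySem.Int.floordiv ((m.getD (1+i') []).getD j 0 * ((m.headD []).headD 0)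
        - (m.getD (1+i') []).getD 0 0 * (m.headD []).getD j 0) prev)).length := by
    simp only [List.length_map, List.length_range']
    exact hj
  rw [List.getD_eq_getElem _ _ hlen, List.getElem_map, List.getElem_range']
  norm_num

theorem pvStepSquare (n k : Nat) (a : List (List Int)) (p prev : Int)
    (hl : a.length = n) (hr : ∀ i < n, (a.getD i []).length = n) :
    (abZrow k (n-(k+1)) (k+1) (abZcol k (n-(k+1)) (k+1)
        (abIloop k n p prev (n-(k+1)) (k+1) a))).length = n ∧
    ∀ i < n, ((abZrow k (n-(k+1)) (k+1) (abZcol k (n-(k+1)) (k+1)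
        (abIloop k n p prev (n-(k+1)) (k+1) a))).getD i []).length = n := by
  constructor
  · rw [abZrowLen, abZcolLen, abIloopLen, hl]
  · intro i hi
    by_cases hik : i = k
    · subst hik
      rw [abZrowRowLen, abZcolGetD, if_neg (by omega),
        abIloopGetD i n p prev _ _ _ (by omega) i, if_neg (by omega)]
      exact hr i hi
    · rw [abZrowGetDNe _ _ _ _ _ hik, abZcolGetD, abIloopGetD k n p prev _ _ _ (by omega) i]
      simp only [abIloopLen, hl]
      have hri := hr i hi
      split_ifs <;> (try simp only [List.length_set, abJloopLen]) <;> exact hri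

-- after one outer iteration of A's loop, the trailing submatrix is exactly B's condensation
theorem pvStep (n k : Nat) (a : List (List Int)) (prev : Int)
    (hl : a.length = n) (hr : ∀ i < n, (a.getD i []).length = n) (hk : k + 1 ≤ n) :
    pvTrail (k+1) (abZrow k (n-(k+1)) (k+1) (abZcol k (n-(k+1)) (k+1)
        (abIloop k n ((a.getD k []).getD k 0) prev (n-(k+1)) (k+1) a))) =
      bbCondense (pvTrail k a) prev := by
  have hsq := pvStepSquare n k a ((a.getD k []).getD k 0) prev hl hr
  have hp0 : (pvTrail k a).headD [] = (a.getD k []).drop k := by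
    rw [pvHeadDGetD, pvTrailGetD]; norm_num
  have hpp : ((pvTrail k a).headD []).headD 0 = (a.getD k []).getD k 0 := by
    rw [hp0, pvHeadDGetD, pvDropGetD]; norm_num
  apply pvListExt _ _ []
  · rw [pvTrailLen, hsq.1, bbCondenseLen, pvTrailLen, hl]
    omega
  · intro i' hi'
    rw [pvTrailLen, hsq.1] at hi'
    have hin : k+1+i' < n := by omega
    have hrl : (a.getD (k+1+i') []).length = n := hr _ hin
    rw [pvTrailGetD]
    apply pvListExt _ _ 0
    · rw [List.length_drop, hsq.2 _ hin, bbCondenseRowLen, pvTrailGetD, List.length_drop]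
      rw [show k + (1+i') = k+1+i' from by omega, hrl]
      omega
    · intro j' hj'
      rw [List.length_drop, hsq.2 _ hin] at hj'
      have hjn : k+1+j' < n := by omega
      rw [pvDropGetD]
      rw [abZrowGetDNe _ _ _ _ _ (show k+1+i' ≠ k from by omega)]
      rw [abZcolGetD, abIloopLen,
        if_pos (show k+1 ≤ k+1+i' ∧ k+1+i' < k+1+(n-(k+1)) ∧ k+1+i' < a.length from by omega)]
      rw [pvGetDSet, if_neg (fun h => absurd h.1 (by omega))]
      rw [abIloopGetD k n _ prev _ _ _ (by omega) (k+1+i'),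
        if_pos (show k+1 ≤ k+1+i' ∧ k+1+i' < k+1+(n-(k+1)) ∧ k+1+i' < a.length from by omega)]
      rw [abJloopGetD k _ _ prev _ _ _ (by omega) (k+1+j'),
        if_pos (show k+1 ≤ k+1+j' ∧ k+1+j' < k+1+(n-(k+1)) ∧ k+1+j' < (a.getD (k+1+i') []).length from by omega)]
      rw [bbCondenseEntry _ _ _ _ (by
        rw [pvTrailGetD, List.length_drop, show k + (1+i') = k+1+i' from by omega, hrl]
        omega)]
      rw [hpp, hp0, pvTrailGetD, pvDropGetD, pvDropGetD, pvDropGetD]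
      rw [show k + (1+i') = k+1+i' from by omega, show k + (1+j') = k+1+j' from by omega]
      norm_num

theorem pvTrailPivot (k : Nat) (a : List (List Int)) :
    ((pvTrail k a).headD []).headD 0 = (a.getD k []).getD k 0 := by
  rw [show (pvTrail k a).headD [] = (pvTrail k a).getD 0 [] from pvHeadDGetD _ _,
    pvTrailGetD, pvHeadDGetD, pvDropGetD]; norm_num

theorem pvSwapSquare (n k s : Nat) (a : List (List Int)) (hl : a.length = n)
    (hr : ∀ i < n, (a.getD i []).length = n) (hs : s < n) (hk : k < n) :
    ((a.set k (a.getD s [])).set s (a.getD k [])).length = n ∧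
    ∀ i < n, (((a.set k (a.getD s [])).set s (a.getD k [])).getD i []).length = n := by
  constructor
  · simp [hl]
  · intro i hi
    simp only [pvGetDSet, List.length_set, hl]
    split_ifs with h1 h2
    · exact hr k hk
    · exact hr s hs
    · exact hr i hi

theorem pvSwapTrail (n k t : Nat) (a : List (List Int)) (hl : a.length = n)
    (ht : k+1+t < n) :
    pvTrail k ((a.set k (a.getD (k+1+t) [])).set (k+1+t) (a.getD k [])) =
      ((pvTrail k a).set 0 ((pvTrail k a).getD (t+1) [])).set (t+1) ((pvTrail k a).getD 0 []) := by
  apply pvListExt _ _ []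
  · simp [pvTrailLen, hl]
  · intro i' hi'
    have hi2 : i' < n - k := by
      simpa [pvTrailLen, hl] using hi'
    rw [pvTrailGetD]
    simp only [pvGetDSet, List.length_set, pvTrailLen, pvTrailGetD, hl]
    by_cases h1 : i' = t+1
    · subst h1
      rw [if_pos ⟨by omega, by omega⟩, if_pos ⟨by omega, by omega⟩]
      norm_num
    · by_cases h0 : i' = 0
      · subst h0
        rw [if_neg (fun h => absurd h.1 (by omega)), if_pos ⟨by omega, by omega⟩,
          if_neg (fun h => absurd h.1 (by omega)), if_pos ⟨by omega, by omega⟩]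
        rw [show k + (t+1) = k+1+t from by omega]
      · rw [if_neg (fun h => absurd h.1 (by omega)), if_neg (fun h => absurd h.1 (by omega)),
          if_neg (fun h => absurd h.1 (by omega)), if_neg (fun h => absurd h.1 (by omega))]

theorem pvBloopEq (n : Nat) :
    ∀ (f k : Nat) (a : List (List Int)) (sign prev : Int),
      a.length = n → (∀ i < n, (a.getD i []).length = n) → n = k + 1 + f →
      abBloop n f k a sign prev = bbDetff (f+1) (pvTrail k a) prev sign := by
  intro f
  induction f with
  | zero =>
    intro k a sign prev hl hr hn
    rw [abBloop, show (0:Nat)+1 = 1 from rfl, bbDetff, pvTrailPivot]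
    rw [show n - 1 = k from by omega]
  | succ f ih =>
    intro k a sign prev hl hr hn
    have hkn : k < n := by omega
    have hka : k < a.length := by omega
    rw [show f+1+1 = f+2 from rfl]
    simp only [abBloop, bbDetff, pvTrailPivot]
    by_cases hp : (a.getD k []).getD k 0 = 0
    · rw [if_pos hp, if_pos hp]
      rw [abSfindEq a k (n-(k+1)) (k+1) (by omega)]
      rw [pvTrailFindIdx, List.drop_eq_getElem_cons hka, List.findIdx?_cons]
      rw [if_neg (show ¬((a[k].getD k 0 != 0) = true) from by
            rw [← List.getD_eq_getElem a [] hka, hp]; simp)]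
      cases hQ : (a.drop (k+1)).findIdx? (fun row => row.getD k 0 != 0) with
      | none => rfl
      | some t =>
        have htb : t < n - (k+1) := by
          have := List.findIdx?_eq_some_iff_findIdx_eq.mp hQ
          simp only [List.length_drop, hl] at this
          omega
        simp only [Option.map_some]
        have hswap := pvSwapTrail n k t a hl (by omega)
        have hsw := pvSwapSquare n k (k+1+t) a hl hr (by omega) hkn
        have hsq2 := pvStepSquare n k ((a.set k (a.getD (k+1+t) [])).set (k+1+t) (a.getD k []))
          (((((a.set k (a.getD (k+1+t) [])).set (k+1+t) (a.getD k [])).getD k []).getD k 0)) prev hsw.1 hsw.2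
        rw [ih (k+1) _ (-sign) _ hsq2.1 hsq2.2 (by omega)]
        rw [pvStep n k _ prev hsw.1 hsw.2 (by omega)]
        rw [← hswap, pvTrailPivot]
    · rw [if_neg hp, if_neg hp]
      have hsq2 := pvStepSquare n k a ((a.getD k []).getD k 0) prev hl hr
      show abBloop n f (k+1) (abZrow k (n-(k+1)) (k+1) (abZcol k (n-(k+1)) (k+1)
          (abIloop k n ((a.getD k []).getD k 0) prev (n-(k+1)) (k+1) a))) sign ((a.getD k []).getD k 0)
        = bbDetff (f+1) (bbCondense (pvTrail k a) prev) ((a.getD k []).getD k 0) sign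
      rw [ih (k+1) _ sign _ hsq2.1 hsq2.2 (by omega)]
      rw [pvStep n k a prev hl hr (by omega)]

theorem pvDetEq (m : List (List Int)) (κ : Nat) (hl : m.length = κ)
    (hr : ∀ row ∈ m, row.length = κ) : det_bareiss m = bbDet m := by
  by_cases hm : m = []
  · subst hm; rfl
  · have hn : m.length ≠ 0 := by simpa using hm
    have hsq : ∀ i < m.length, (m.getD i []).length = m.length := by
      intro i hi
      rw [List.getD_eq_getElem _ _ hi, hr _ (List.getElem_mem hi), ← hl]
    simp only [det_bareiss, bbDet, List.map_id']
    rw [if_neg hn, if_neg (by simpa [List.isEmpty_iff] using hm)]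
    rw [pvBloopEq m.length (m.length - 1) 0 m 1 1 rfl hsq (by omega)]
    rw [show m.length - 1 + 1 = m.length from by omega]
    congr 1
    simp [pvTrail]

theorem abCombosNil : ∀ (xs : List Nat) (j : Nat), xs.length < j → abCombos j xs = [] := by
  intro xs
  induction xs with
  | nil => intro j h; match j, h with | j+1, _ => rfl
  | cons x xs ih =>
    intro j h
    match j, h with
    | j+1, h => rw [abCombos, ih j (by simp at h; omega), ih (j+1) (by simp at h; omega)]; rfl

theorem abCombosLen : ∀ (j : Nat) (xs : List Nat) (c : List Nat), c ∈ abCombos j xs → c.length = j := by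
  intro j xs
  induction xs generalizing j with
  | nil =>
    intro c hc
    match j, hc with
    | 0, hc => simp [abCombos] at hc; simp [hc]
    | j+1, hc => simp [abCombos] at hc
  | cons x xs ih =>
    intro c hc
    match j, hc with
    | 0, hc => simp [abCombos] at hc; simp [hc]
    | j+1, hc =>
      rw [abCombos] at hc
      rcases List.mem_append.mp hc with h | h
      · rcases List.mem_map.mp h with ⟨c', hc', rfl⟩
        simp [ih j c' hc']
      · exact ih (j+1) c h

theorem abCombosUnroll (n : Nat) :
    ∀ (L start t : Nat), L = n - start →
      abCombos (t+1) (List.range' start L) =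
        (List.range' start (n - t - start)).flatMap
          (fun first => (abCombos t (List.range' (first+1) (n - (first+1)))).map (fun c => first :: c)) := by
  intro L
  induction L with
  | zero =>
    intro start t h
    rw [show n - t - start = 0 from by omega]
    rfl
  | succ L ihL =>
    intro start t h
    rw [List.range'_succ, abCombos]
    by_cases hz : n - t - start = 0
    · rw [hz]
      rw [abCombosNil _ _ (by simp [List.length_range']; omega),
        abCombosNil _ _ (by simp [List.length_range']; omega)]
      rfl
    · rw [ihL (start+1) t (by omega)]
      rw [show n - t - start = (n - t - (start+1)) + 1 from by omega, List.range'_succ,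
        List.flatMap_cons]
      rw [show L = n - (start+1) from by omega]
theorem bbSubsetsEq (n : Nat) :
    ∀ (fuel start : Nat) (kk : Int), fuel = kk.toNat → 0 ≤ kk →
      bbSubsetsA n fuel start kk = abCombos kk.toNat (List.range' start (n - start)) := by
  intro fuel
  induction fuel with
  | zero =>
    intro start kk h h0
    have hk : kk = 0 := by omega
    subst hk
    simp [bbSubsetsA, abCombos]
  | succ f ih =>
    intro start kk h h0
    have hk0 : ¬ kk = 0 := by omega
    have hkpos : (0:Int) < kk := by omega
    rw [bbSubsetsA, if_neg hk0, if_pos hkpos]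
    rw [show kk.toNat = f+1 from h.symm, abCombosUnroll n (n - start) start f rfl]
    rw [show n + 1 - (f+1) - start = n - f - start from by omega]
    congr 1
    funext first
    rw [ih (first+1) (kk-1) (by omega) (by omega), show (kk-1).toNat = f from by omega]

theorem bbSubsetsRange (n : Nat) (kk : Int) (h : 0 ≤ kk) :
    bbSubsets 0 n kk = abCombos kk.toNat (List.range n) := by
  rw [bbSubsets, bbSubsetsEq n kk.toNat 0 kk rfl h, List.range_eq_range']
  rw [show n - 0 = n from rfl]

theorem pvFoldOne : ∀ (l : List Int), l.foldl (fun g v => (Int.gcd g |v| : Int)) 1 = 1 := by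
  intro l
  induction l with
  | nil => rfl
  | cons v l ih => simpa [Int.one_gcd] using ih

theorem bbGoColsEq (matrix : List (List Int)) (ri : List Nat) :
    ∀ (cis : List (List Nat)) (g : Int),
      bbGoCols matrix ri cis g =
        (cis.map (fun ci => bbDet (ri.map (fun r => ci.map (fun c => (matrix.getD r []).getD c 0))))).foldl
          (fun g v => (Int.gcd g |v| : Int)) g := by
  intro cis
  induction cis with
  | nil => intro g; rfl
  | cons ci rest ih =>
    intro g
    rw [List.map_cons, List.foldl_cons, bbGoCols]
    by_cases h1 : (Int.gcd g |bbDet (ri.map (fun r => ci.map (fun c => (matrix.getD r []).getD c 0)))| : Int) = 1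
    · rw [if_pos h1, h1, pvFoldOne]
    · rw [if_neg h1, ih]

theorem pvOuterOne (matrix : List (List Int)) (cis : List (List Nat)) :
    ∀ (ris : List (List Nat)),
      ris.foldl (fun g ri =>
        (cis.map (fun ci => bbDet (ri.map (fun r => ci.map (fun c => (matrix.getD r []).getD c 0))))).foldl
          (fun g v => (Int.gcd g |v| : Int)) g) 1 = 1 := by
  intro ris
  induction ris with
  | nil => rfl
  | cons ri rest ih => rw [List.foldl_cons, pvFoldOne]; exact ih

theorem bbGoRowsEq (matrix : List (List Int)) (cis : List (List Nat)) :
    ∀ (ris : List (List Nat)) (g : Int),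
      bbGoRows matrix cis ris g =
        ris.foldl (fun g ri =>
          (cis.map (fun ci => bbDet (ri.map (fun r => ci.map (fun c => (matrix.getD r []).getD c 0))))).foldl
            (fun g v => (Int.gcd g |v| : Int)) g) g := by
  intro ris
  induction ris with
  | nil => intro g; rfl
  | cons ri rest ih =>
    intro g
    rw [List.foldl_cons, bbGoRows, bbGoColsEq]
    by_cases h1 : (cis.map (fun ci => bbDet (ri.map (fun r => ci.map (fun c => (matrix.getD r []).getD c 0))))).foldl
        (fun g v => (Int.gcd g |v| : Int)) g = 1
    · rw [if_pos h1, h1, pvOuterOne]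
    · rw [if_neg h1, ih]


theorem pvSubSquare (matrix : List (List Int)) (κ : Nat) (ri ci : List Nat)
    (hri : ri.length = κ) (hci : ci.length = κ) :
    (ri.map (fun r => ci.map (fun c => (matrix.getD r []).getD c 0))).length = κ ∧
    ∀ row ∈ ri.map (fun r => ci.map (fun c => (matrix.getD r []).getD c 0)), row.length = κ := by
  constructor
  · simp [hri]
  · intro row hrow
    obtain ⟨r, _, rfl⟩ := List.mem_map.mp hrow
    simp [hci]

-- ===== VERDICT (by name: the statement is the Claim_ definition above) =====
theorem minors_gcd_spec : Claim_equal_minors_gcd := by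
  intro matrix k _ hpre
  show minors_gcd matrix k = minors_gcd_alt matrix k
  have hk0 := hpre.1
  simp only [minors_gcd, minors_gcd_alt, gcd_list]
  rw [bbSubsetsRange _ _ hk0, bbSubsetsRange _ _ hk0, bbGoRowsEq, List.foldl_flatMap]
  apply PySem.List.foldl_congr_mem
  intro g ri hri
  congr 1
  apply List.map_congr_left
  intro ci hci
  have hsq := pvSubSquare matrix k.toNat ri ci (abCombosLen _ _ _ hri) (abCombosLen _ _ _ hci)
  exact pvDetEq _ _ hsq.1 hsq.2
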